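-- pv_equiv track=rewrite | github.com/anishalle/introtoai | as3/main.py | normalize_literal
-- ===== SOURCE A (Python) =====
-- NEGATION_PREFIXES = ("~", "∼", "¬")
--
-- TRUE_LITERAL = "__TRUE__"
--
-- FALSE_LITERAL = "__FALSE__"
--
-- def normalize_literal(token):
--     token = token.strip()
--     negated = False
--
--     while token and token[0] in NEGATION_PREFIXES:
--         negated = not negated
--         token = token[1:]
--
--     if not token:
--         return None
--
--     if token == "True":
--         return FALSE_LITERAL if negated else TRUE_LITERAL
--     if token == "False":
--         return TRUE_LITERAL if negated else FALSE_LITERAL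
--
--     return ("~" + token) if negated else token
-- ===== SOURCE B (Python) =====
-- NEGATION_PREFIXES = ("~", "\u223c", "\u00ac")
--
-- TRUE_LITERAL = "__TRUE__"
--
-- FALSE_LITERAL = "__FALSE__"
--
-- def _negate_chain(t):
--     # Recursively consume negation prefixes, negating the RESULT string by
--     # toggling a "~" prefix on it (no boolean flag anywhere).
--     if not t:
--         return None
--     if t[0] in NEGATION_PREFIXES:
--         r = _negate_chain(t[1:])
--         if r is None:
--             return None
--         return r[1:] if r.startswith("~") else "~" + r
--     return t
--
-- def normalize_literal(token):
--     r = _negate_chain(token.strip())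
--     if r is None:
--         return None
--     if r == "True":
--         return TRUE_LITERAL
--     if r == "~True":
--         return FALSE_LITERAL
--     if r == "False":
--         return FALSE_LITERAL
--     if r == "~False":
--         return TRUE_LITERAL
--     return r
-- ===== Notes on version B (the rewrite author's own statement) =====
-- stated objective: alternative
-- what changed: Replaces A's peel-one-char loop with a toggling boolean flag by a recursion that carries no flag at all: it negates the result string itself by toggling a '~' prefix on the way back up, and maps the True/False/~True/~False forms to the sentinel literals only at the very end.
import Mathlib
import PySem

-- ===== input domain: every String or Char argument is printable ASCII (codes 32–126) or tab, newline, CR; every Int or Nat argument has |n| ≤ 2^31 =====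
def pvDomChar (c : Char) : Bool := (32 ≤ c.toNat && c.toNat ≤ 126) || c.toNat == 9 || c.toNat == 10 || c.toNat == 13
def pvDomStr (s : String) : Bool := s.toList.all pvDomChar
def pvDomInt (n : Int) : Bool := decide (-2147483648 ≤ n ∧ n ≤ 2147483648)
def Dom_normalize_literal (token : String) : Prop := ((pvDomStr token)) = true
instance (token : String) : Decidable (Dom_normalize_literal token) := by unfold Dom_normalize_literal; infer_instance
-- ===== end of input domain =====

-- B replaces A's peel-loop-with-boolean-flag by a recursion that negates the RESULT string
-- (toggling a '~' prefix), mapping True/False forms last; objective: alternative decomposition.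

-- ===== PORT A =====
def pvIsNegA (c : Char) : Bool := c = '~' || c = '∼' || c = '¬'

def pvTailA (cs : List Char) (negated : Bool) : Option String :=
  if cs = [] then none
  else if cs = "True".toList then
    if negated then some "__FALSE__" else some "__TRUE__"
  else if cs = "False".toList then
    if negated then some "__TRUE__" else some "__FALSE__"
  else if negated then some (String.ofList ('~' :: cs)) else some (String.ofList cs)

def pvLoopA (cs : List Char) (negated : Bool) : Option String :=
  match cs with
  | c :: rest => if pvIsNegA c then pvLoopA rest (!negated) else pvTailA (c :: rest) negated
  | [] => pvTailA [] negated

def normalize_literal (token : String) : Option String :=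
  pvLoopA (PySem.Str.strip token).toList false

-- ===== PORT B =====
def pvIsNegB (c : Char) : Bool := c = '~' || c = '∼' || c = '¬'

def pvNegChainB : List Char → Option (List Char)
  | [] => none
  | c :: rest =>
    if pvIsNegB c then
      match pvNegChainB rest with
      | none => none
      | some r => some (if r.head? = some '~' then r.tail else '~' :: r)
    else some (c :: rest)

def normalize_literal_alt (token : String) : Option String :=
  match pvNegChainB (PySem.Str.strip token).toList with
  | none => none
  | some r =>
    if r = "True".toList then some "__TRUE__"
    else if r = '~' :: "True".toList then some "__FALSE__"
    else if r = "False".toList then some "__FALSE__"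
    else if r = '~' :: "False".toList then some "__TRUE__"
    else some (String.ofList r)

-- ===== PRECONDITION & SPEC =====
def Spec_normalize_literal (token : String) (out : Option String) : Prop := out = normalize_literal_alt token
instance (token : String) (out : Option String) : Decidable (Spec_normalize_literal token out) := by unfold Spec_normalize_literal; infer_instance

-- ===== CLAIM (what is proved, stated in full; the proofs are below) =====
def Claim_equal_normalize_literal : Prop := ∀ (token : String), Dom_normalize_literal token → Spec_normalize_literal token (normalize_literal token)

-- ===== LEMMAS AND PROOFS =====

-- head of the dropWhile remainder fails the predicate
theorem pv_core_head (cs : List Char) (c : Char) (r : List Char)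
    (h : cs.dropWhile pvIsNegB = c :: r) : pvIsNegB c = false := by
  induction cs with
  | nil => simp at h
  | cons a rest ih =>
    by_cases ha : pvIsNegB a
    · rw [List.dropWhile_cons, if_pos ha] at h; exact ih h
    · rw [List.dropWhile_cons, if_neg ha] at h
      cases h; simpa using ha

-- closed form of B's negation-chain recursion
theorem pvNegChainB_eq (cs : List Char) :
    pvNegChainB cs =
      (if cs.dropWhile pvIsNegB = [] then none
       else some (if (cs.length - (cs.dropWhile pvIsNegB).length) % 2 == 1
                  then '~' :: cs.dropWhile pvIsNegB else cs.dropWhile pvIsNegB)) := by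
  induction cs with
  | nil => simp [pvNegChainB]
  | cons c rest ih =>
    by_cases hc : pvIsNegB c
    · have hle : (rest.dropWhile pvIsNegB).length ≤ rest.length := List.length_dropWhile_le _ _
      simp only [pvNegChainB, hc, if_pos, List.dropWhile_cons, ih]
      by_cases hnil : rest.dropWhile pvIsNegB = []
      · simp [hnil]
      · obtain ⟨d, r, hd⟩ : ∃ d r, rest.dropWhile pvIsNegB = d :: r :=
          match h : rest.dropWhile pvIsNegB, hnil with
          | d :: r, _ => ⟨d, r, rfl⟩
        have hdneg : pvIsNegB d = false := pv_core_head rest d r hd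
        have hdne : d ≠ '~' := by intro h; rw [h] at hdneg; simp [pvIsNegB] at hdneg
        have hlen : (c :: rest).length - (rest.dropWhile pvIsNegB).length
            = (rest.length - (rest.dropWhile pvIsNegB).length) + 1 := by
          simp only [List.length_cons]; omega
        rw [hlen]
        cases hb : (rest.length - (rest.dropWhile pvIsNegB).length) % 2 == 1 <;>
          simp_all [Nat.add_mod]
    · simp [pvNegChainB, hc]

-- A's loop in terms of the same dropWhile core and removed-length parity
theorem pvLoopA_eq (cs : List Char) (neg : Bool) :
    pvLoopA cs neg =
      pvTailA (cs.dropWhile pvIsNegB)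
        (neg ^^ ((cs.length - (cs.dropWhile pvIsNegB).length) % 2 == 1)) := by
  induction cs generalizing neg with
  | nil => simp [pvLoopA]
  | cons c rest ih =>
    by_cases h : pvIsNegA c
    · have h' : pvIsNegB c := h
      have hle : (rest.dropWhile pvIsNegB).length ≤ rest.length := List.length_dropWhile_le _ _
      simp only [pvLoopA, h, if_pos, List.dropWhile_cons, h', ih]
      congr 1
      have hlen : (c :: rest).length - (rest.dropWhile pvIsNegB).length
           = (rest.length - (rest.dropWhile pvIsNegB).length) + 1 := by
        simp only [List.length_cons]; omega
      rw [hlen]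
      cases hb : (rest.length - (rest.dropWhile pvIsNegB).length) % 2 == 1 <;>
        · simp at hb; simp [Nat.add_mod, hb]
    · have h' : ¬ pvIsNegB c := h
      simp [pvLoopA, h, h']

-- ===== VERDICT (by name: the statement is the Claim_ definition above) =====
theorem normalize_literal_spec : Claim_equal_normalize_literal := by
  intro token _
  unfold Spec_normalize_literal normalize_literal normalize_literal_alt
  rw [pvLoopA_eq, pvNegChainB_eq]
  set cs := (PySem.Str.strip token).toList with hcs
  by_cases hnil : cs.dropWhile pvIsNegB = []
  · simp [hnil, pvTailA]
  · obtain ⟨d, r, hd⟩ : ∃ d r, cs.dropWhile pvIsNegB = d :: r :=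
      match h : cs.dropWhile pvIsNegB, hnil with
      | d :: r, _ => ⟨d, r, rfl⟩
    have hdneg : pvIsNegB d = false := pv_core_head cs d r hd
    have hdne : d ≠ '~' := by intro h; rw [h] at hdneg; simp [pvIsNegB] at hdneg
    cases hb : (cs.length - (cs.dropWhile pvIsNegB).length) % 2 == 1
    · -- not negated: B's r = core, which cannot start with '~'
      simp only [hnil, Bool.false_xor]
      rw [hd]
      by_cases h1 : d :: r = "True".toList
      · simp [pvTailA, h1]
      · by_cases h2 : d :: r = "False".toList
        · simp [pvTailA, h2]
        · simp [pvTailA, hdne]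
    · -- negated: B's r = '~' :: core
      simp only [hnil, Bool.false_xor]
      rw [hd]
      have hT : ('~' : Char) ≠ 'T' := by decide
      have hF : ('~' : Char) ≠ 'F' := by decide
      have h1 : '~' :: d :: r ≠ "True".toList := by
        intro h; injection h with h _; exact hT h
      have h2 : '~' :: d :: r ≠ "False".toList := by
        intro h; injection h with h _; exact hF h
      by_cases h3 : d :: r = "True".toList
      · simp [pvTailA, h3]
      · by_cases h4 : d :: r = "False".toList
        · simp [pvTailA, h4]
        · simp [pvTailA]
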